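-- pv_equiv track=rewrite | github.com/JBoyd-12/TSP-Artificial-Intelligence | Project 6/Partition.py | createFinalPartition
-- ===== SOURCE A (Python) =====
-- def createFinalPartition(finalSets, numberSet):
--     part1 = []
--     part2 = []
--     if len(finalSets) == 0:
--         while numberSet:
--             number = max(numberSet)
--             part1.append(number)
--             numberSet.remove(number)
--
--             if (len(numberSet) == 0):
--                 break
--             else:
--                 number = max(numberSet)
--                 part2.append(number)
--                 numberSet.remove(number)
--     else:
--         part1 = finalSets[0].copy()
--         part2 = finalSets[1].copy()
--
--     sum1 = sum(part1)
--     sum2 = sum(part2)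
--     difference = abs(sum1 - sum2)
--     return part1, part2, difference
-- ===== SOURCE B (Python) =====
-- def createFinalPartition(finalSets, numberSet):
--     if finalSets:
--         part1 = list(finalSets[0])
--         part2 = list(finalSets[1])
--     else:
--         part1, part2 = [], []
--         for i, v in enumerate(sorted(numberSet, reverse=True)):
--             if i % 2 == 0:
--                 part1.append(v)
--             else:
--                 part2.append(v)
--     return part1, part2, abs(sum(part1) - sum(part2))
-- ===== Notes on version B (the rewrite author's own statement) =====
-- stated objective: alternative
-- what changed: Replaces A's repeated max()+remove() extraction loop with one descending sort followed by a single alternating pass (note: A empties the numberSet argument in place, B does not; equivalence is about the return value). Pre_ excludes finalSets of length exactly 1, where both A and B raise IndexError.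
import Mathlib
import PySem

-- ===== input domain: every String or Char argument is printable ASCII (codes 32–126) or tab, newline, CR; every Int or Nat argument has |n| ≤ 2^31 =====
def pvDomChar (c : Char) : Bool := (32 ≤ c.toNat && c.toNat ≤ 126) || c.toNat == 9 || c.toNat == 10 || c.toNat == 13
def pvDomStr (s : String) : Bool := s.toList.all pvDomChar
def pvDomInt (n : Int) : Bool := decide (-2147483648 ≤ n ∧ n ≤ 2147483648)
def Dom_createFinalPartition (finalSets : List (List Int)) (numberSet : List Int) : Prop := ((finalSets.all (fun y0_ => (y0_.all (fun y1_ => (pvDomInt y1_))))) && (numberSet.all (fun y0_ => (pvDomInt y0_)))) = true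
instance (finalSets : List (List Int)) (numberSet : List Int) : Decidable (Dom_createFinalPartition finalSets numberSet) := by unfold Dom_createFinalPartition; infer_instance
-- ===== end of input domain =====

-- B replaces A's repeated max+remove extraction loop by one descending sort plus a single
-- alternating pass (A empties numberSet in place; B does not — equivalence is about the return value).

-- ===== PORT A =====
-- termination helper for the while-loop port (cited in decreasing_by)
theorem pvRemoveLen {ns ns' : List Int} {v : Int} (h : PySem.List.remove? ns v = some ns') :
    ns'.length + 1 = ns.length := by
  have hv : v ∈ ns := by
    by_contra hv
    rw [(PySem.List.remove?_eq_none_iff ns v).2 hv] at h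
    cases h
  rw [PySem.List.remove?_eq_some_erase ns v hv] at h
  cases h
  have := List.length_pos_of_mem hv
  rw [List.length_erase_of_mem hv]
  omega

-- the 'while numberSet:' loop of A: take max into part1, remove it, then (if any left) max into part2
def pvLoopA (ns p1 p2 : List Int) : List Int × List Int :=
  if _hns : ns = [] then (p1, p2)
  else
    match _h1 : PySem.List.max? ns (fun x => x) with
    | none => (p1, p2)
    | some m1 =>
      match _h2 : PySem.List.remove? ns m1 with
      | none => (p1 ++ [m1], p2)
      | some ns1 =>
        if _hns1 : ns1 = [] then (p1 ++ [m1], p2)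
        else
          match _h3 : PySem.List.max? ns1 (fun x => x) with
          | none => (p1 ++ [m1], p2)
          | some m2 =>
            match _h4 : PySem.List.remove? ns1 m2 with
            | none => (p1 ++ [m1], p2 ++ [m2])
            | some ns2 => pvLoopA ns2 (p1 ++ [m1]) (p2 ++ [m2])
termination_by ns.length
decreasing_by
  have e1 := pvRemoveLen _h2
  have e2 := pvRemoveLen _h4
  omega

def createFinalPartition (finalSets : List (List Int)) (numberSet : List Int) : List Int × List Int × Int :=
  if PySem.List.len finalSets = 0 then
    let r := pvLoopA numberSet [] []
    (r.1, r.2, |r.1.sum - r.2.sum|)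
  else
    let part1 := PySem.List.pyGetD finalSets 0 []
    let part2 := PySem.List.pyGetD finalSets 1 []
    (part1, part2, |part1.sum - part2.sum|)

-- ===== PORT B =====
def createFinalPartition_alt (finalSets : List (List Int)) (numberSet : List Int) : List Int × List Int × Int :=
  if PySem.List.len finalSets ≠ 0 then  -- 'if finalSets:'
    let part1 := PySem.List.pyGetD finalSets 0 []
    let part2 := PySem.List.pyGetD finalSets 1 []
    (part1, part2, |part1.sum - part2.sum|)
  else
    let s := PySem.List.sorted numberSet (fun x => x) true
    let r := (PySem.List.enumerate s 0).foldl
      (fun (p : List Int × List Int) iv =>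
        if PySem.Int.mod iv.1 2 = 0 then (p.1 ++ [iv.2], p.2) else (p.1, p.2 ++ [iv.2]))
      ([], [])
    (r.1, r.2, |r.1.sum - r.2.sum|)

-- ===== PRECONDITION & SPEC =====
-- Pre_ excludes finalSets of length exactly 1: there A raises IndexError on finalSets[1] (B raises too).
def Pre_createFinalPartition (finalSets : List (List Int)) (numberSet : List Int) : Prop :=
  finalSets = [] ∨ 2 ≤ finalSets.length
instance (finalSets : List (List Int)) (numberSet : List Int) : Decidable (Pre_createFinalPartition finalSets numberSet) := by unfold Pre_createFinalPartition; infer_instance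

def pvWitness_createFinalPartition : List (List Int) × List Int := ([], [3, 1, 2, 2])

def Spec_createFinalPartition (finalSets : List (List Int)) (numberSet : List Int) (out : List Int × List Int × Int) : Prop := out = createFinalPartition_alt finalSets numberSet
instance (finalSets : List (List Int)) (numberSet : List Int) (out : List Int × List Int × Int) : Decidable (Spec_createFinalPartition finalSets numberSet out) := by unfold Spec_createFinalPartition; infer_instance

-- ===== CLAIM (what is proved, stated in full; the proofs are below) =====
def Claim_equal_createFinalPartition : Prop := ∀ (finalSets : List (List Int)) (numberSet : List Int), Dom_createFinalPartition finalSets numberSet → Pre_createFinalPartition finalSets numberSet → Spec_createFinalPartition finalSets numberSet (createFinalPartition finalSets numberSet)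

-- ===== LEMMAS AND PROOFS =====

-- the alternating split both programs compute, stated structurally
def pvAltSplit : List Int → List Int × List Int
  | [] => ([], [])
  | x :: t => (x :: (pvAltSplit t).2, (pvAltSplit t).1)

-- sorted(ns, reverse=True) starts with max(ns), and its tail is the descending sort of ns with that max removed
theorem pvSortedDescCons {ns : List Int} {m : Int}
    (hm : PySem.List.max? ns (fun x => x) = some m) :
    PySem.List.sorted ns (fun x => x) true = m :: PySem.List.sorted (ns.erase m) (fun x => x) true := by
  have hmem : m ∈ ns := PySem.List.max?_mem hm
  have hne : ns ≠ [] := List.ne_nil_of_mem hmem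
  obtain ⟨h, t, hs⟩ : ∃ h t, PySem.List.sorted ns (fun x => x) true = h :: t := by
    cases hsrt : PySem.List.sorted ns (fun x => x) true with
    | nil => exact absurd ((PySem.List.sorted_eq_nil_iff ns _ true).1 hsrt) hne
    | cons h t => exact ⟨h, t, rfl⟩
  have hperm : (PySem.List.sorted ns (fun x => x) true).Perm ns := PySem.List.sorted_perm ns _ true
  have hhm : h = m := by
    have hhmem : h ∈ ns := hperm.mem_iff.1 (hs ▸ List.mem_cons_self)
    have h1 : h ≤ m := PySem.List.max?_isMax hm h hhmem
    have h2 : m ≤ h := PySem.List.key_head_sorted_rev_ge ns (fun x => x) hs m hmem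
    exact le_antisymm h1 h2
  rw [hs, hhm]
  congr 1
  -- t equals the descending sort of ns.erase m
  have hpt : t.Perm (ns.erase m) := by
    have h1 : (m :: t).Perm (m :: ns.erase m) :=
      (hhm ▸ hs ▸ hperm).trans (List.perm_cons_erase hmem)
    exact (List.perm_cons m).1 h1
  have hps : (PySem.List.sorted (ns.erase m) (fun x => x) true).Perm (ns.erase m) :=
    PySem.List.sorted_perm _ _ true
  refine PySem.List.eq_of_perm_of_pairwise_le_of_injective (fun x => -x) neg_injective
    (hpt.trans hps.symm) ?_ ?_
  · have hp := PySem.List.sorted_pairwise_rev ns (fun x => x)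
    rw [hs] at hp
    exact (List.pairwise_cons.1 hp).2.imp (fun hab => neg_le_neg hab)
  · exact (PySem.List.sorted_pairwise_rev (ns.erase m) (fun x => x)).imp (fun hab => neg_le_neg hab)

theorem pvLoopA_spec : ∀ (n : Nat) (ns p1 p2 : List Int), ns.length = n →
    pvLoopA ns p1 p2 =
      (p1 ++ (pvAltSplit (PySem.List.sorted ns (fun x => x) true)).1,
       p2 ++ (pvAltSplit (PySem.List.sorted ns (fun x => x) true)).2) := by
  intro n
  induction n using Nat.strong_induction_on with
  | _ n ih =>
    intro ns p1 p2 hlen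
    rw [pvLoopA]
    by_cases hns : ns = []
    · subst hns
      simp [PySem.List.sorted, pvAltSplit]
    · simp only [dif_neg hns]
      split
      · next hm1 => exact absurd ((PySem.List.max?_eq_none_iff ns (fun x => x)).1 hm1) hns
      · next m1 hm1 =>
        have hm1mem : m1 ∈ ns := PySem.List.max?_mem hm1
        have hsd1 := pvSortedDescCons hm1
        split
        · next hr1 =>
          exact absurd ((PySem.List.remove?_eq_none_iff ns m1).1 hr1) (by simp [hm1mem])
        · next ns1 hr1 =>
          have hns1e : ns1 = ns.erase m1 := by
            rw [PySem.List.remove?_eq_some_erase ns m1 hm1mem] at hr1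
            exact (Option.some_inj.1 hr1).symm
          subst hns1e
          by_cases hns1 : ns.erase m1 = []
          · simp only [dif_pos hns1]
            rw [hsd1, hns1]
            simp [PySem.List.sorted, pvAltSplit]
          · simp only [dif_neg hns1]
            split
            · next hm2 =>
              exact absurd ((PySem.List.max?_eq_none_iff (ns.erase m1) (fun x => x)).1 hm2) hns1
            · next m2 hm2 =>
              have hm2mem : m2 ∈ ns.erase m1 := PySem.List.max?_mem hm2
              split
              · next hr2 =>
                exact absurd ((PySem.List.remove?_eq_none_iff (ns.erase m1) m2).1 hr2)
                  (by simp [hm2mem])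
              · next ns2 hr2 =>
                have hns2e : ns2 = (ns.erase m1).erase m2 := by
                  rw [PySem.List.remove?_eq_some_erase (ns.erase m1) m2 hm2mem] at hr2
                  exact (Option.some_inj.1 hr2).symm
                subst hns2e
                have hl1 : (ns.erase m1).length + 1 = ns.length :=
                  pvRemoveLen (PySem.List.remove?_eq_some_erase ns m1 hm1mem)
                have hl2 : ((ns.erase m1).erase m2).length + 1 = (ns.erase m1).length :=
                  pvRemoveLen (PySem.List.remove?_eq_some_erase (ns.erase m1) m2 hm2mem)
                rw [ih ((ns.erase m1).erase m2).length (by omega) _ _ _ rfl]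
                rw [hsd1, pvSortedDescCons hm2]
                simp [pvAltSplit]

theorem pvFoldB_spec : ∀ (s : List Int) (i : Int) (p1 p2 : List Int),
    (PySem.List.enumerate s i).foldl
      (fun (p : List Int × List Int) iv =>
        if PySem.Int.mod iv.1 2 = 0 then (p.1 ++ [iv.2], p.2) else (p.1, p.2 ++ [iv.2]))
      (p1, p2)
    = if PySem.Int.mod i 2 = 0 then (p1 ++ (pvAltSplit s).1, p2 ++ (pvAltSplit s).2)
      else (p1 ++ (pvAltSplit s).2, p2 ++ (pvAltSplit s).1) := by
  intro s
  induction s with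
  | nil =>
    intro i p1 p2
    by_cases h : PySem.Int.mod i 2 = 0 <;> simp [pvAltSplit, PySem.List.enumerate_nil]
  | cons x t ih =>
    intro i p1 p2
    rw [PySem.List.enumerate_cons, List.foldl_cons]
    have hmi : PySem.Int.mod i 2 = i % 2 := PySem.Int.mod_eq_emod_of_pos (by norm_num)
    have hmi1 : PySem.Int.mod (i + 1) 2 = (i + 1) % 2 := PySem.Int.mod_eq_emod_of_pos (by norm_num)
    by_cases hpar : PySem.Int.mod i 2 = 0
    · have hodd : ¬ PySem.Int.mod (i + 1) 2 = 0 := by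
        rw [hmi1]; rw [hmi] at hpar; omega
      have hstep : (if PySem.Int.mod ((i, x) : Int × Int).1 2 = 0
            then ((p1, p2).1 ++ [((i, x) : Int × Int).2], (p1, p2).2)
            else ((p1, p2).1, (p1, p2).2 ++ [((i, x) : Int × Int).2])) = (p1 ++ [x], p2) := by
        rw [if_pos hpar]
      rw [hstep, ih (i + 1) (p1 ++ [x]) p2, if_neg hodd, if_pos hpar]
      simp [pvAltSplit]
    · have heven : PySem.Int.mod (i + 1) 2 = 0 := by
        rw [hmi1]; rw [hmi] at hpar; omega
      have hstep : (if PySem.Int.mod ((i, x) : Int × Int).1 2 = 0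
            then ((p1, p2).1 ++ [((i, x) : Int × Int).2], (p1, p2).2)
            else ((p1, p2).1, (p1, p2).2 ++ [((i, x) : Int × Int).2])) = (p1, p2 ++ [x]) := by
        rw [if_neg hpar]
      rw [hstep, ih (i + 1) p1 (p2 ++ [x]), if_pos heven, if_neg hpar]
      simp [pvAltSplit]

-- ===== VERDICT (by name: the statement is the Claim_ definition above) =====
theorem createFinalPartition_spec : Claim_equal_createFinalPartition := by
  intro finalSets numberSet _hdom hpre
  unfold Spec_createFinalPartition createFinalPartition createFinalPartition_alt
  rcases hpre with hnil | hlen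
  · subst hnil
    simp only [PySem.List.len_eq, List.length_nil, Int.natCast_zero, ne_eq,
      not_true_eq_false, if_false]
    rw [pvLoopA_spec numberSet.length numberSet [] [] rfl]
    rw [pvFoldB_spec (PySem.List.sorted numberSet (fun x => x) true) 0 [] []]
    simp [PySem.Int.mod]
  · have hne : PySem.List.len finalSets ≠ 0 := by
      rw [PySem.List.len_eq]; omega
    rw [if_neg hne, if_pos hne]
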